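-- pv_equiv track=rewrite | github.com/b-Rocks2718/Dioptase-OS | assets/img_to_hex.py | pack_pixels_into_fill_words
-- ===== SOURCE A (Python) =====
-- from typing import Iterable, Iterator, Sequence
--
-- def pack_pixels_into_fill_words(pixels: Iterable[int]) -> list[int]:
--     """Pack 16-bit pixels into 32-bit words for `.fill`.
--
--     Purpose:
--     - Preserve the original byte stream while using `.fill` (32-bit directive)
--       by packing two little-endian 16-bit pixels into each word.
--
--     Inputs:
--     - `pixels`: iterable of 16-bit pixel values.
--
--     Outputs:
--     - List of 32-bit `.fill` words where low 16 bits are the first pixel and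
--       high 16 bits are the second pixel.
--
--     Invariants:
--     - Pixel values are masked to 16 bits.
--     """
--
--     words: list[int] = []
--     pending: int | None = None
--
--     for pixel in pixels:
--         pixel &= 0xFFFF
--         if pending is None:
--             pending = pixel
--         else:
--             words.append(pending | (pixel << 16))
--             pending = None
--
--     if pending is not None:
--         # Pad the final halfword with zero if the pixel count is odd.
--         words.append(pending)
--
--     return words
-- ===== SOURCE B (Python) =====
-- def pack_pixels_into_fill_words(pixels):
--     px = [p & 0xFFFF for p in pixels]
--     n = len(px)
--     words = []
--     for i in range(0, n, 2):
--         if i + 1 < n: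
--             words.append(px[i] | (px[i + 1] << 16))
--         else:
--             words.append(px[i])
--     return words
-- ===== Notes on version B (the rewrite author's own statement) =====
-- stated objective: alternative
-- what changed: Replaced the pending/None state-machine fold with a masking map that materializes the list, followed by an indexed pairing loop over range(0, n, 2) that combines px[i] with px[i+1]<<16 (or appends the lone masked tail).
import Mathlib
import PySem

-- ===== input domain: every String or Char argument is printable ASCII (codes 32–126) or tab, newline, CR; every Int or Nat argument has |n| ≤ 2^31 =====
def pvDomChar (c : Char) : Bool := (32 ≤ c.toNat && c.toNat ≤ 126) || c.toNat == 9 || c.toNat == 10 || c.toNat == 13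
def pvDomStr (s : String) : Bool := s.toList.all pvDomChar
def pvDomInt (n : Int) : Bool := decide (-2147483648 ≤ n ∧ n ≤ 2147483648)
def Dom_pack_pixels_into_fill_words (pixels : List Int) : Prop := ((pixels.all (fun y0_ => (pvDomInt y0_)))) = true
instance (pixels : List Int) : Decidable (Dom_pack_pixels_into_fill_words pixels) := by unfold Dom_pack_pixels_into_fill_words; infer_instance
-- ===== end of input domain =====

-- B replaces A's pending/None state-machine fold with a masking map followed by an
-- indexed pairing loop over range(0, n, 2) (alternative decomposition, no pending state).

-- ===== PORT A =====
-- loop state: (words, pending); Int.land/lor/shiftLeft match Python's &, |, << on ints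
def pack_pixels_into_fill_words (pixels : List Int) : List Int :=
  let st := pixels.foldl
    (fun (st : List Int × Option Int) pixel =>
      let pixel := Int.land pixel 0xFFFF
      match st.2 with
      | none => (st.1, some pixel)
      | some pending => (st.1 ++ [Int.lor pending (Int.shiftLeft pixel 16)], none))
    ([], none)
  match st.2 with
  | none => st.1
  | some pending => st.1 ++ [pending]

-- ===== PORT B =====
def pack_pixels_into_fill_words_alt (pixels : List Int) : List Int :=
  let px := pixels.map (fun p => Int.land p 0xFFFF)
  let n : Int := px.length
  (PySem.List.pyRange 0 n 2).foldl
    (fun words i =>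
      if i + 1 < n then
        words ++ [Int.lor (PySem.List.pyGetD px i 0) (Int.shiftLeft (PySem.List.pyGetD px (i + 1) 0) 16)]
      else
        words ++ [PySem.List.pyGetD px i 0])
    []

-- ===== PRECONDITION & SPEC =====
def Spec_pack_pixels_into_fill_words (pixels : List Int) (out : List Int) : Prop := out = pack_pixels_into_fill_words_alt pixels
instance (pixels : List Int) (out : List Int) : Decidable (Spec_pack_pixels_into_fill_words pixels out) := by unfold Spec_pack_pixels_into_fill_words; infer_instance

-- ===== CLAIM (what is proved, stated in full; the proofs are below) =====
def Claim_equal_pack_pixels_into_fill_words : Prop := ∀ (pixels : List Int), Dom_pack_pixels_into_fill_words pixels → Spec_pack_pixels_into_fill_words pixels (pack_pixels_into_fill_words pixels)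

-- ===== LEMMAS AND PROOFS =====

-- the common characterization of both loops: pair up a masked list two at a time
def pvPair (xs : List Int) : List Int :=
  match xs with
  | [] => []
  | [x] => [x]
  | x :: y :: rest => Int.lor x (Int.shiftLeft y 16) :: pvPair rest

-- A's loop body and finisher, named for the invariant lemma
def pvStep (st : List Int × Option Int) (pixel : Int) : List Int × Option Int :=
  let pixel := Int.land pixel 0xFFFF
  match st.2 with
  | none => (st.1, some pixel)
  | some pending => (st.1 ++ [Int.lor pending (Int.shiftLeft pixel 16)], none)

def pvFinish (st : List Int × Option Int) : List Int :=
  match st.2 with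
  | none => st.1
  | some pending => st.1 ++ [pending]

def pvOpt : Option Int → List Int
  | none => []
  | some p => [p]

theorem pvInvariantA (pixels : List Int) : ∀ (words : List Int) (pend : Option Int),
    pvFinish (pixels.foldl pvStep (words, pend))
      = words ++ pvPair (pvOpt pend ++ pixels.map (fun p => Int.land p 0xFFFF)) := by
  induction pixels with
  | nil =>
    intro words pend
    cases pend <;> simp [pvFinish, pvOpt, pvPair]
  | cons x rest ih =>
    intro words pend
    cases pend with
    | none =>
      simp only [List.foldl_cons, pvStep]
      rw [ih words (some (Int.land x 0xFFFF))]
      simp [pvOpt]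
    | some p =>
      simp only [List.foldl_cons, pvStep]
      rw [ih (words ++ [Int.lor p (Int.shiftLeft (Int.land x 0xFFFF) 16)]) none]
      simp [pvOpt, pvPair]

-- step-2 range induction lemmas
theorem pvRange_two_nil (a b : Int) (h : b ≤ a) : PySem.List.pyRange a b 2 = [] := by
  rw [PySem.List.pyRange_of_pos a b (by norm_num)]
  rw [if_neg (not_lt.mpr h)]
  simp

theorem pvRange_two_cons (a b : Int) (h : a < b) :
    PySem.List.pyRange a b 2 = a :: PySem.List.pyRange (a + 2) b 2 := by
  rw [PySem.List.pyRange_of_pos a b (by norm_num), PySem.List.pyRange_of_pos (a + 2) b (by norm_num)]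
  have hc : (if a < b then ((b - a + 2 - 1) / 2).toNat else 0)
      = (if a + 2 < b then ((b - (a + 2) + 2 - 1) / 2).toNat else 0) + 1 := by
    split_ifs <;> omega
  rw [hc, List.range_succ_eq_map]
  simp only [List.map_cons, List.map_map]
  refine List.cons_eq_cons.mpr ⟨by push_cast; ring, ?_⟩
  refine List.map_congr_left ?_
  intro k _
  simp only [Function.comp]
  push_cast
  ring

-- B's loop body, named for the invariant lemma
def pvStepB (px : List Int) (words : List Int) (i : Int) : List Int :=
  if i + 1 < (px.length : Int) then
    words ++ [Int.lor (PySem.List.pyGetD px i 0) (Int.shiftLeft (PySem.List.pyGetD px (i + 1) 0) 16)]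
  else
    words ++ [PySem.List.pyGetD px i 0]

theorem pvInvariantB (px : List Int) : ∀ (k : Nat) (words : List Int),
    (PySem.List.pyRange (k : Int) (px.length : Int) 2).foldl (pvStepB px) words
      = words ++ pvPair (px.drop k) := by
  intro k
  induction hn : px.length - k using Nat.strong_induction_on generalizing k with
  | _ m ih =>
    intro words
    by_cases hk : k < px.length
    · rw [pvRange_two_cons _ _ (by exact_mod_cast hk)]
      simp only [List.foldl_cons, pvStepB]
      by_cases hk1 : k + 1 < px.length
      · rw [if_pos (by exact_mod_cast hk1)]
        have h2 : ((k : Int) + 2) = ((k + 2 : Nat) : Int) := by push_cast; ring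
        rw [h2, ih (px.length - (k + 2)) (by omega) (k + 2) rfl]
        have hd : px.drop k = px[k] :: px[k + 1] :: px.drop (k + 2) := by
          rw [List.drop_eq_getElem_cons hk, List.drop_eq_getElem_cons hk1]
        rw [hd]
        have g1 : PySem.List.pyGetD px (k : Int) 0 = px[k] := by
          simp [PySem.List.pyGetD_natCast, List.getD_eq_getElem?_getD, hk]
        have g2 : PySem.List.pyGetD px ((k : Int) + 1) 0 = px[k + 1] := by
          have hcast : ((k : Int) + 1) = ((k + 1 : Nat) : Int) := by push_cast; ring
          rw [hcast, PySem.List.pyGetD_natCast]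
          exact List.getD_eq_getElem px 0 hk1
        rw [g1, g2]
        simp [pvPair]
      · rw [if_neg (by exact_mod_cast hk1)]
        have hlen : px.length = k + 1 := by omega
        have h2 : ((k : Int) + 2) = ((k + 2 : Nat) : Int) := by push_cast; ring
        rw [h2, pvRange_two_nil _ _ (by exact_mod_cast (by omega : px.length ≤ k + 2))]
        have hd : px.drop k = [px[k]] := by
          rw [List.drop_eq_getElem_cons hk]
          simp [List.drop_eq_nil_of_le, hlen]
        have g1 : PySem.List.pyGetD px (k : Int) 0 = px[k] := by
          rw [PySem.List.pyGetD_natCast]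
          exact List.getD_eq_getElem px 0 hk
        rw [hd, g1]
        simp [pvPair]
    · rw [pvRange_two_nil _ _ (by exact_mod_cast (by omega : px.length ≤ k))]
      rw [List.drop_eq_nil_of_le (by omega)]
      simp [pvPair]

-- ===== VERDICT (by name: the statement is the Claim_ definition above) =====
theorem pack_pixels_into_fill_words_spec : Claim_equal_pack_pixels_into_fill_words := by
  intro pixels _
  unfold Spec_pack_pixels_into_fill_words
  have eA : pack_pixels_into_fill_words pixels = pvFinish (pixels.foldl pvStep ([], none)) := rfl
  have eB : pack_pixels_into_fill_words_alt pixels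
      = (PySem.List.pyRange 0 (((pixels.map (fun p => Int.land p 0xFFFF)).length : Nat) : Int) 2).foldl
          (pvStepB (pixels.map (fun p => Int.land p 0xFFFF))) [] := rfl
  have hB := pvInvariantB (pixels.map (fun p => Int.land p 0xFFFF)) 0 []
  simp only [Nat.cast_zero, List.drop_zero, List.nil_append] at hB
  rw [eA, eB, hB, pvInvariantA]
  simp [pvOpt]
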